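-- pv_equiv track=rewrite | github.com/elashrry/Hangman | hangman.py | word_to_dic
-- ===== SOURCE A (Python) =====
-- def word_to_dic(word):
--     """takes a string word and creat a dictionary where the keys are
--     the letters of word (without repetition) and the values for each key
--     is a list of the indexes of that key in word"""
--     word_dic = {}
--     for i in range(len(word)):
--         try:
--             word_dic[word[i]].append(i)
--         except KeyError:
--             word_dic[word[i]] = [i]
--     return word_dic
-- ===== SOURCE B (Python) =====
-- def word_to_dic(word):
--     """takes a string word and creat a dictionary where the keys are
--     the letters of word (without repetition) and the values for each key
--     is a list of the indexes of that key in word"""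
--     return {c: [i for i, ch in enumerate(word) if ch == c]
--             for c in dict.fromkeys(word)}
-- ===== Notes on version B (the rewrite author's own statement) =====
-- stated objective: idiomatic
-- what changed: Replaces the single-pass try/except dict accumulation by a dict comprehension that first takes the distinct letters in first-occurrence order and then re-scans the whole word per distinct letter to collect its indices.
import Mathlib
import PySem

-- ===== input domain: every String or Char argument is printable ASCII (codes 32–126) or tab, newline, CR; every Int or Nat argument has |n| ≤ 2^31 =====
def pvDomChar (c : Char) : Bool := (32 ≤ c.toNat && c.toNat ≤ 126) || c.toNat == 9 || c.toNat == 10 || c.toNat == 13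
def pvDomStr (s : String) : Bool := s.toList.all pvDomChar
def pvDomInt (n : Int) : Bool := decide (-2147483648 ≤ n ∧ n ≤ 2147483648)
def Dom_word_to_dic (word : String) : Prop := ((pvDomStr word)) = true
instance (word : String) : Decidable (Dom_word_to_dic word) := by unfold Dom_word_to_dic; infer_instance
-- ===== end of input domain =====

-- B replaces A's single-pass try/except accumulation by a per-distinct-letter re-scan
-- (dict comprehension over dict.fromkeys(word)); same return value, no speed claim.

-- ===== PORT A =====
-- try: word_dic[word[i]].append(i) / except KeyError: word_dic[word[i]] = [i]
def wstepA (word : String) (d : PySem.Dict String (List Int)) (i : Int) :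
    PySem.Dict String (List Int) :=
  match PySem.Str.pyGet? word i with
  | some c =>
      match d.get? (String.ofList [c]) with
      | some v => d.insert (String.ofList [c]) (v ++ [i])
      | none => d.insert (String.ofList [c]) [i]
  | none => d  -- unreachable: i ∈ range(len(word))

def word_to_dic (word : String) : List (String × List Int) :=
  ((PySem.List.pyRange 0 (PySem.Str.len word) 1).foldl (wstepA word) PySem.Dict.empty).items

-- ===== PORT B =====
-- {c: [i for i, ch in enumerate(word) if ch == c] for c in dict.fromkeys(word)};
-- the comprehension's keys are distinct and in this order, so the dict's item list
-- is exactly this list of pairs.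
def word_to_dic_alt (word : String) : List (String × List Int) :=
  let ws := word.toList.map (fun ch => String.ofList [ch])
  (PySem.List.dedup ws).map (fun c =>
    (c, ((PySem.List.enumerate ws 0).filter (fun p => p.2 == c)).map (fun p => p.1)))

-- ===== PRECONDITION & SPEC =====
def Spec_word_to_dic (word : String) (out : List (String × List Int)) : Prop := out = word_to_dic_alt word
instance (word : String) (out : List (String × List Int)) : Decidable (Spec_word_to_dic word out) := by unfold Spec_word_to_dic; infer_instance

-- ===== CLAIM (what is proved, stated in full; the proofs are below) =====
def Claim_equal_word_to_dic : Prop := ∀ (word : String), Dom_word_to_dic word → Spec_word_to_dic word (word_to_dic word)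

-- ===== LEMMAS AND PROOFS =====

-- A's try/except step is a `modify` with default []
theorem wstepA_eq (word : String) (d : PySem.Dict String (List Int)) (k : Nat)
    (hk : k < word.toList.length) :
    wstepA word d (k : Int) = d.modify (String.ofList [word.toList[k]]) [] (· ++ [(k : Int)]) := by
  unfold wstepA PySem.Dict.modify
  rw [PySem.Str.pyGet?_natCast]
  cases h : d.get? (String.ofList [word.toList[k]]) <;>
    simp [List.getElem?_eq_getElem hk, PySem.Dict.getD_eq_get?_getD, h]

-- the enumerate-shaped step A's fold is reduced to
def gstep (d : PySem.Dict String (List Int)) (p : Int × String) :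
    PySem.Dict String (List Int) :=
  d.modify p.2 [] (· ++ [p.1])

theorem foldA_eq_foldE (word : String) :
    ∀ (k : Nat), k ≤ word.toList.length →
    (PySem.List.pyRange 0 (k : Int) 1).foldl (wstepA word) PySem.Dict.empty
      = (PySem.List.enumerate ((word.toList.take k).map (fun ch => String.ofList [ch])) 0).foldl
          gstep PySem.Dict.empty := by
  intro k
  induction k with
  | zero => intro _; simp
  | succ k ih =>
      intro hk
      have hk' : k < word.toList.length := by omega
      have hr : (PySem.List.pyRange 0 ((k : Nat) + 1 : Int) 1)
          = PySem.List.pyRange 0 (k : Int) 1 ++ [(k : Int)] :=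
        PySem.List.pyRange_one_succ_right (by positivity)
      have ht : word.toList.take (k + 1) = word.toList.take k ++ [word.toList[k]] := by
        rw [List.take_add_one, List.getElem?_eq_getElem hk']
        rfl
      have hlen : ((word.toList.take k).map (fun ch => String.ofList [ch])).length = k := by
        simp only [List.length_map, List.length_take]; omega
      push_cast at hr ⊢
      rw [hr, List.foldl_append, ih (by omega), ht]
      simp only [List.map_append, List.map_cons, List.map_nil, PySem.List.enumerate_append,
        List.foldl_append, hlen]
      simp [PySem.List.enumerate, gstep, wstepA_eq word _ k hk']

theorem word_to_dic_spec' (word : String) : word_to_dic word = word_to_dic_alt word := by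
  unfold word_to_dic word_to_dic_alt
  set ws := word.toList.map (fun ch => String.ofList [ch]) with hws
  have hlen : PySem.Str.len word = (word.toList.length : Int) := PySem.Str.len_eq word
  rw [hlen, foldA_eq_foldE word word.toList.length (le_refl _), List.take_length]
  rw [← hws]
  -- the enumerate fold, as a modify-fold over swapped pairs
  have hswap :
      (PySem.List.enumerate ws 0).foldl gstep PySem.Dict.empty
        = ((PySem.List.enumerate ws 0).map (fun p => (p.2, p.1))).foldl
            (fun d p => d.modify p.1 [] (· ++ [p.2])) PySem.Dict.empty := by
    rw [List.foldl_map]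
    rfl
  -- keys: first occurrences in order
  have hkeys :
      ((PySem.List.enumerate ws 0).foldl gstep PySem.Dict.empty).keys
        = PySem.List.dedup ws := by
    unfold gstep
    rw [PySem.Dict.keys_foldl_modify_key (PySem.List.enumerate ws 0) (fun p => p.2) []
      (fun _ p v => v ++ [p.1]) PySem.Dict.empty]
    simp [PySem.List.map_snd_enumerate, PySem.Dict.keys, PySem.Dict.empty,
      PySem.Set.update, PySem.Set.ofList_eq_foldl]
  have hnodup :
      ((PySem.List.enumerate ws 0).foldl gstep PySem.Dict.empty).keys.Nodup := by
    rw [hkeys]; rw [PySem.List.dedup_eq_ofList]; exact PySem.Set.nodup_ofList ws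
  rw [PySem.Dict.items_eq_map_keys _ hnodup [], hkeys]
  apply List.map_congr_left
  intro c _
  have hval :
      ((PySem.List.enumerate ws 0).foldl gstep PySem.Dict.empty).getD c []
        = ((PySem.List.enumerate ws 0).filter (fun p => p.2 == c)).map (fun p => p.1) := by
    rw [hswap, PySem.Dict.getD_foldl_modify_append]
    simp [List.filter_map, Function.comp_def]
  rw [hval]

-- ===== VERDICT (by name: the statement is the Claim_ definition above) =====
theorem word_to_dic_spec : Claim_equal_word_to_dic := by
  intro word _
  exact word_to_dic_spec' word
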